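-- pv_equiv track=rewrite | github.com/arwa-aamir/pyhton | isp_diff_template.py | singleline_diff
-- ===== SOURCE A (Python) =====
-- IDENTICAL = -1
--
-- def singleline_diff(line1, line2):
--     """
--     Inputs:
--       line1 - first single line string
--       line2 - second single line string
--     Output:
--       Returns the index where the first difference between
--       line1 and line2 occurs.
--
--       Returns IDENTICAL if the two lines are the same.
--     """
--
--     # if both strings are of same length
--     if(len(line1)==len(line2)):
--         for character in range(len(line1)):
--             if line1[character]!=line2[character]:
--                 return character
--         return IDENTICAL
--     # if both strings are of different length
--     elif(len(line1)!=len(line2)):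
--         #find larger string
--         if(len(line1)>len(line2)):
--
--             shorter_string_lenth=len(line2)
--         else:
--
--             shorter_string_lenth=len(line1)
--
--         for character in range(shorter_string_lenth):
--             if line1[character]!=line2[character]:
--                 return character
--             ##if the entire shorter line matches the beginning of the longer
--             ##line the first difference is located at the index
--             ##that is one past the last character in the shorter line
--         return shorter_string_lenth
-- ===== SOURCE B (Python) =====
-- IDENTICAL = -1
--
-- def singleline_diff(line1, line2):
--     if line1 == line2:
--         return IDENTICAL
--     # binary search for the longest k with line1[:k] == line2[:k]
--     lo, hi = 0, min(len(line1), len(line2))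
--     while lo < hi:
--         mid = (lo + hi + 1) // 2
--         if line1[:mid] == line2[:mid]:
--             lo = mid
--         else:
--             hi = mid - 1
--     return lo
-- ===== Notes on version B (the rewrite author's own statement) =====
-- stated objective: alternative
-- what changed: Replaces A's length-case analysis with two duplicated index-scanning loops by an equality check plus a binary search for the longest k with line1[:k] == line2[:k] using slice comparisons.
import Mathlib
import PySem

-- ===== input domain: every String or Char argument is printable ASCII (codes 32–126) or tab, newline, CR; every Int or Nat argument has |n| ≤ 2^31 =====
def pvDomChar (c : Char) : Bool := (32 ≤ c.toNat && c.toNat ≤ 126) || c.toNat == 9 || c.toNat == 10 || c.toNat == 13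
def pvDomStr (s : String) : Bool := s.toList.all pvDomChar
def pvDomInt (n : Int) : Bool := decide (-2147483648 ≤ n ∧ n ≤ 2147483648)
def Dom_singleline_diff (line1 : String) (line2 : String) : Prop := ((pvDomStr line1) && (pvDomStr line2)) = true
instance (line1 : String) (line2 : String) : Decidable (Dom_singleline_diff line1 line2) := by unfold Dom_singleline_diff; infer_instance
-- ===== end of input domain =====

-- B replaces A's duplicated index-scanning loops by a binary search for the longest equal
-- prefix over slice comparisons (objective: alternative algorithm).

-- ===== PORT A =====
def IDENTICAL : Int := -1

-- the early-returning 'for character in range(n)' loop of A, 'left' iterations remaining,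
-- current index i: first index where the two lines differ (none = loop fell through)
def pvScanA (l1 l2 : List Char) : Nat → Nat → Option Nat
  | 0, _ => none
  | left + 1, i =>
    if PySem.List.pyGet? l1 (i : Int) ≠ PySem.List.pyGet? l2 (i : Int) then some i
    else pvScanA l1 l2 left (i + 1)

def singleline_diff (line1 : String) (line2 : String) : Int :=
  let l1 := line1.toList
  let l2 := line2.toList
  if l1.length = l2.length then
    match pvScanA l1 l2 l1.length 0 with
    | some i => (i : Int)
    | none => IDENTICAL
  else
    let shorter_string_lenth := if l1.length > l2.length then l2.length else l1.length
    match pvScanA l1 l2 shorter_string_lenth 0 with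
    | some i => (i : Int)
    | none => (shorter_string_lenth : Int)

-- ===== PORT B =====
-- the 'while lo < hi' loop of Source B; 'fuel' only makes the loop total: hi - lo shrinks
-- every iteration, so fuel = (hi - lo).toNat at the call site is enough
def pvBS (l1 l2 : List Char) : Nat → Int → Int → Int
  | 0, lo, _ => lo
  | fuel + 1, lo, hi =>
    if lo < hi then
      let mid := PySem.Int.floordiv (lo + hi + 1) 2
      if PySem.List.slice l1 none (some mid) = PySem.List.slice l2 none (some mid) then
        pvBS l1 l2 fuel mid hi
      else
        pvBS l1 l2 fuel lo (mid - 1)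
    else lo

def singleline_diff_alt (line1 : String) (line2 : String) : Int :=
  if line1 = line2 then IDENTICAL
  else
    let n := min line1.toList.length line2.toList.length
    pvBS line1.toList line2.toList n 0 (n : Int)

-- ===== PRECONDITION & SPEC =====
def Spec_singleline_diff (line1 : String) (line2 : String) (out : Int) : Prop := out = singleline_diff_alt line1 line2
instance (line1 : String) (line2 : String) (out : Int) : Decidable (Spec_singleline_diff line1 line2 out) := by unfold Spec_singleline_diff; infer_instance

-- ===== CLAIM (what is proved, stated in full; the proofs are below) =====
def Claim_equal_singleline_diff : Prop := ∀ (line1 : String) (line2 : String), Dom_singleline_diff line1 line2 → Spec_singleline_diff line1 line2 (singleline_diff line1 line2)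

-- ===== LEMMAS AND PROOFS =====

theorem pvBS_mid_bounds (lo hi : Int) (h : lo < hi) :
    lo + 1 ≤ PySem.Int.floordiv (lo + hi + 1) 2 ∧ PySem.Int.floordiv (lo + hi + 1) 2 ≤ hi := by
  have e : lo + hi + 1 = (lo + 1) + hi := by ring
  rw [e]
  exact PySem.Int.floordiv_two_mid_bounds (by omega)

-- length of the longest common prefix of two character lists
def pvLcp : List Char → List Char → Nat
  | a :: as, b :: bs => if a = b then pvLcp as bs + 1 else 0
  | _, _ => 0

theorem pvLcp_le_left : ∀ l1 l2 : List Char, pvLcp l1 l2 ≤ l1.length := by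
  intro l1
  induction l1 with
  | nil => intro l2; cases l2 <;> simp [pvLcp]
  | cons a as ih =>
    intro l2
    cases l2 with
    | nil => simp [pvLcp]
    | cons b bs =>
      by_cases hab : a = b <;> simp [pvLcp, hab]
      exact ih bs

theorem pvLcp_le_right : ∀ l1 l2 : List Char, pvLcp l1 l2 ≤ l2.length := by
  intro l1
  induction l1 with
  | nil => intro l2; cases l2 <;> simp [pvLcp]
  | cons a as ih =>
    intro l2
    cases l2 with
    | nil => simp [pvLcp]
    | cons b bs =>
      by_cases hab : a = b <;> simp [pvLcp, hab]
      exact ih bs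

theorem pvLcp_self : ∀ l : List Char, pvLcp l l = l.length := by
  intro l
  induction l with
  | nil => simp [pvLcp]
  | cons a as ih => simp [pvLcp, ih]

theorem eq_of_pvLcp_len : ∀ l1 l2 : List Char, l1.length = l2.length →
    pvLcp l1 l2 = l1.length → l1 = l2 := by
  intro l1
  induction l1 with
  | nil =>
    intro l2 hlen _; cases l2 with
    | nil => rfl
    | cons b bs => simp at hlen
  | cons a as ih =>
    intro l2 hlen hl
    cases l2 with
    | nil => simp at hlen
    | cons b bs =>
      by_cases hab : a = b
      · simp [pvLcp, hab] at hl
        simp at hlen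
        subst hab
        simp [ih bs hlen hl]
      · simp [pvLcp, hab] at hl

theorem take_eq_iff_le_pvLcp : ∀ (l1 l2 : List Char) (k : Nat), k ≤ l1.length → k ≤ l2.length →
    (l1.take k = l2.take k ↔ k ≤ pvLcp l1 l2) := by
  intro l1
  induction l1 with
  | nil =>
    intro l2 k h1 _
    have hk : k = 0 := by simpa using h1
    subst hk
    simp
  | cons a as ih =>
    intro l2 k h1 h2
    cases l2 with
    | nil =>
      have hk : k = 0 := by simpa using h2
      subst hk
      simp
    | cons b bs =>
      cases k with
      | zero => simp
      | succ k' =>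
        simp only [List.take_succ_cons, List.cons.injEq]
        by_cases hab : a = b
        · subst hab
          have h' := ih bs k' (by simpa using h1) (by simpa using h2)
          simp [pvLcp, h']
        · simp [pvLcp, hab]

-- the scan of A computes pvLcp of the drops
theorem pvScanA_eq : ∀ (l1 l2 : List Char) (left i : Nat), i + left ≤ l1.length → i + left ≤ l2.length →
    pvScanA l1 l2 left i =
      (if pvLcp (l1.drop i) (l2.drop i) < left then some (i + pvLcp (l1.drop i) (l2.drop i)) else none) := by
  intro l1 l2 left
  induction left with
  | zero => intro i _ _; simp [pvScanA]
  | succ left' ih =>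
    intro i h1 h2
    have hi1 : i < l1.length := by omega
    have hi2 : i < l2.length := by omega
    have g1 : PySem.List.pyGet? l1 (i : Int) = some l1[i] := by
      simp [PySem.List.pyGet?_natCast, List.getElem?_eq_getElem hi1]
    have g2 : PySem.List.pyGet? l2 (i : Int) = some l2[i] := by
      simp [PySem.List.pyGet?_natCast, List.getElem?_eq_getElem hi2]
    have d1 : l1.drop i = l1[i] :: l1.drop (i + 1) := List.drop_eq_getElem_cons hi1
    have d2 : l2.drop i = l2[i] :: l2.drop (i + 1) := List.drop_eq_getElem_cons hi2
    rw [pvScanA]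
    by_cases hc : l1[i] = l2[i]
    · rw [if_neg (by simp [g1, g2, hc])]
      rw [ih (i + 1) (by omega) (by omega)]
      rw [d1, d2]
      simp only [pvLcp, if_pos hc]
      by_cases hlt : pvLcp (l1.drop (i + 1)) (l2.drop (i + 1)) < left'
      · rw [if_pos hlt, if_pos (by omega)]
        congr 1
        omega
      · rw [if_neg hlt, if_neg (by omega)]
    · rw [if_pos (by simp [g1, g2, hc])]
      rw [d1, d2]
      simp [pvLcp, hc]

-- the binary search of B converges to pvLcp
theorem pvBS_eq : ∀ (l1 l2 : List Char) (fuel : Nat) (lo hi : Int), 0 ≤ lo →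
    lo ≤ (pvLcp l1 l2 : Int) → (pvLcp l1 l2 : Int) ≤ hi →
    hi ≤ (min l1.length l2.length : Nat) → (hi - lo).toNat ≤ fuel →
    pvBS l1 l2 fuel lo hi = (pvLcp l1 l2 : Int) := by
  intro l1 l2 fuel
  induction fuel with
  | zero =>
    intro lo hi h0 hlo hhi hn hf
    rw [pvBS]
    omega
  | succ fuel' ih =>
    intro lo hi h0 hlo hhi hn hf
    rw [pvBS]
    by_cases h : lo < hi
    · rw [if_pos h]
      have hb := pvBS_mid_bounds lo hi h
      set mid := PySem.Int.floordiv (lo + hi + 1) 2 with hmid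
      have hmid0 : (0:Int) ≤ mid := by omega
      have hm1 : mid.toNat ≤ l1.length := by omega
      have hm2 : mid.toNat ≤ l2.length := by omega
      by_cases hsl : PySem.List.slice l1 none (some mid) = PySem.List.slice l2 none (some mid)
      · rw [if_pos hsl]
        have ht : l1.take mid.toNat = l2.take mid.toNat := by
          rwa [PySem.List.slice_to l1 hmid0, PySem.List.slice_to l2 hmid0] at hsl
        have hle : mid.toNat ≤ pvLcp l1 l2 := (take_eq_iff_le_pvLcp l1 l2 mid.toNat hm1 hm2).mp ht
        exact ih mid hi (by omega) (by omega) hhi hn (by omega)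
      · rw [if_neg hsl]
        have hne : ¬ l1.take mid.toNat = l2.take mid.toNat := by
          rw [← PySem.List.slice_to l1 hmid0, ← PySem.List.slice_to l2 hmid0]
          exact hsl
        have hgt : ¬ mid.toNat ≤ pvLcp l1 l2 := fun hle =>
          hne ((take_eq_iff_le_pvLcp l1 l2 mid.toNat hm1 hm2).mpr hle)
        exact ih lo (mid - 1) h0 hlo (by omega) (by omega) (by omega)
    · rw [if_neg h]
      omega

-- ===== VERDICT (by name: the statement is the Claim_ definition above) =====
theorem singleline_diff_spec : Claim_equal_singleline_diff := by
  intro line1 line2 _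
  unfold Spec_singleline_diff singleline_diff singleline_diff_alt
  set l1 := line1.toList with hl1
  set l2 := line2.toList with hl2
  by_cases hs : line1 = line2
  · subst hs
    rw [if_pos rfl]
    rw [pvScanA_eq l1 l1 l1.length 0 (by omega) (by omega)]
    simp [pvLcp_self]
  · have hls : l1 ≠ l2 := fun he => hs (String.ext (by rw [← hl1, ← hl2, he]))
    rw [if_neg hs]
    have hL1 := pvLcp_le_left l1 l2
    have hL2 := pvLcp_le_right l1 l2
    have hBS : pvBS l1 l2 (min l1.length l2.length) 0 ((min l1.length l2.length : Nat) : Int)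
        = (pvLcp l1 l2 : Int) :=
      pvBS_eq l1 l2 _ 0 _ le_rfl (by omega) (by push_cast; omega) le_rfl (by omega)
    by_cases hlen : l1.length = l2.length
    · simp only [if_pos hlen]
      have hlt : pvLcp l1 l2 < l1.length := by
        rcases Nat.lt_or_ge (pvLcp l1 l2) l1.length with h | h
        · exact h
        · exact absurd (eq_of_pvLcp_len l1 l2 hlen (le_antisymm hL1 h)) hls
      rw [pvScanA_eq l1 l2 l1.length 0 (by omega) (by omega)]
      simp only [List.drop_zero, if_pos hlt, Nat.zero_add]
      exact hBS.symm
    · simp only [if_neg hlen]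
      have hshort : (if l1.length > l2.length then l2.length else l1.length) = min l1.length l2.length := by
        split_ifs with h <;> omega
      rw [hshort]
      rw [pvScanA_eq l1 l2 (min l1.length l2.length) 0 (by omega) (by omega)]
      simp only [List.drop_zero, Nat.zero_add]
      by_cases hlt : pvLcp l1 l2 < min l1.length l2.length
      · rw [if_pos hlt]; exact hBS.symm
      · rw [if_neg hlt]
        have : pvLcp l1 l2 = min l1.length l2.length := by omega
        rw [← this] at hBS ⊢
        exact hBS.symm
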